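-- pv_equiv track=rewrite | github.com/lwang94/MDD | app_callbacks/callbacks_modify_util.py | show_operation_order
-- ===== SOURCE A (Python) =====
-- def show_operation_order(operations, x):
--     """
--     Create text showing order of modify operations
--     """
--     for op in operations:
--         if op[0] == 'smooth' and op[1]:
--             x = 'Smooth(' + x + ')'
--         if op[0] == 'derive' and op[1]:
--             x = 'Derive(' + x + ')'
--         if op[0] == 'fit' and op[1]:
--             x = 'Fit(' + x + ')'
--     return x
-- ===== SOURCE B (Python) =====
-- def show_operation_order(operations, x):
--     """
--     Create text showing order of modify operations
--     """
--     mapping = {'smooth': 'Smooth', 'derive': 'Derive', 'fit': 'Fit'}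
--     labels = [mapping[op[0]] for op in operations if op[1] and op[0] in mapping]
--     return ''.join(lab + '(' for lab in reversed(labels)) + x + ')' * len(labels)
-- ===== Notes on version B (the rewrite author's own statement) =====
-- stated objective: alternative
-- what changed: Instead of rebinding x through a loop with three name-equality branches per element, B collects the enabled ops' labels via a dict lookup in one comprehension, then assembles the result in a single expression: the prefixes joined in reversed order, then x, then one ')' per label.
import Mathlib
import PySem

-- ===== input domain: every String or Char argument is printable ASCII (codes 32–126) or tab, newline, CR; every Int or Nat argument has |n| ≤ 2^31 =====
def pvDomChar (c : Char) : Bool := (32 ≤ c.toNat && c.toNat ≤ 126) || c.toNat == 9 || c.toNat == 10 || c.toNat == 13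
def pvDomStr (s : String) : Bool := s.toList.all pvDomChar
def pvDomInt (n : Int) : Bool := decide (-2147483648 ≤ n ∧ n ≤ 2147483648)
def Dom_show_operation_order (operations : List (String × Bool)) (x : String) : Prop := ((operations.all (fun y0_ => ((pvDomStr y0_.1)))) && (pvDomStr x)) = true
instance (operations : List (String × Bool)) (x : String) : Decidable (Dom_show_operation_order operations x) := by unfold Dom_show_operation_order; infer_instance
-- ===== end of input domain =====

-- B separates collecting the enabled ops' labels (dict lookup, one comprehension) from assembling
-- the string in one expression (reversed prefixes ++ x ++ closing parens), instead of A's loop that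
-- rebinds x with three name-equality branches per element; same cost, different decomposition.

-- ===== PORT A =====
def show_operation_order (operations : List (String × Bool)) (x : String) : String :=
  operations.foldl (fun x op =>
    let x := if op.1 == "smooth" && op.2 then "Smooth(" ++ x ++ ")" else x
    let x := if op.1 == "derive" && op.2 then "Derive(" ++ x ++ ")" else x
    let x := if op.1 == "fit" && op.2 then "Fit(" ++ x ++ ")" else x
    x) x

-- ===== PORT B =====
-- mapping = {'smooth': 'Smooth', 'derive': 'Derive', 'fit': 'Fit'}
def pvMapping : PySem.Dict String String :=
  PySem.Dict.ofList [("smooth", "Smooth"), ("derive", "Derive"), ("fit", "Fit")]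

-- labels = [mapping[op[0]] for op in operations if op[1] and op[0] in mapping]
def pvLabels (operations : List (String × Bool)) : List String :=
  operations.filterMap (fun op =>
    if op.2 && pvMapping.contains op.1 then pvMapping.get? op.1 else none)

def show_operation_order_alt (operations : List (String × Bool)) (x : String) : String :=
  let labels := pvLabels operations
  -- ''.join(lab + '(' for lab in reversed(labels)) + x + ')' * len(labels)
  -- ')' * n ported by hand as String.mk (pyRepeat [')'] n) — exact: repetition of a one-char string
  PySem.Str.join "" (labels.reverse.map (fun lab => lab ++ "(")) ++ x
    ++ String.ofList (PySem.List.pyRepeat [')'] (labels.length : Int))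

-- ===== PRECONDITION & SPEC =====
def Spec_show_operation_order (operations : List (String × Bool)) (x : String) (out : String) : Prop := out = show_operation_order_alt operations x
instance (operations : List (String × Bool)) (x : String) (out : String) : Decidable (Spec_show_operation_order operations x out) := by unfold Spec_show_operation_order; infer_instance

-- ===== CLAIM (what is proved, stated in full; the proofs are below) =====
def Claim_equal_show_operation_order : Prop := ∀ (operations : List (String × Bool)) (x : String), Dom_show_operation_order operations x → Spec_show_operation_order operations x (show_operation_order operations x)

-- ===== LEMMAS AND PROOFS =====

theorem pv_join_empty (parts : List (List Char)) : PySem.Chars.join [] parts = parts.flatten := by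
  simp [PySem.Chars.join, List.intercalate]
  induction parts with
  | nil => simp
  | cons p ps ih => cases ps <;> simp_all [List.intersperse]

theorem pv_alt_toList (operations : List (String × Bool)) (x : String) :
    (show_operation_order_alt operations x).toList =
      ((pvLabels operations).reverse.map (fun l => l.toList ++ ['('])).flatten
        ++ x.toList ++ List.replicate (pvLabels operations).length ')' := by
  simp [show_operation_order_alt, PySem.Str.toList_join, pv_join_empty,
    PySem.List.pyRepeat_singleton, List.map_map, Function.comp_def]

theorem pv_A_toList : ∀ (operations : List (String × Bool)) (x : String),
    (show_operation_order operations x).toList =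
      ((pvLabels operations).reverse.map (fun l => l.toList ++ ['('])).flatten
        ++ x.toList ++ List.replicate (pvLabels operations).length ')' := by
  intro operations
  induction operations with
  | nil => intro x; simp [show_operation_order, pvLabels]
  | cons op rest ih =>
    intro x
    obtain ⟨name, b⟩ := op
    cases b with
    | false =>
      have hc : show_operation_order ((name, false) :: rest) x = show_operation_order rest x := by
        simp [show_operation_order]
      have hl : pvLabels ((name, false) :: rest) = pvLabels rest := by
        simp [pvLabels]
      rw [hc, hl]; exact ih x
    | true =>
      by_cases h1 : name = "smooth"
      · subst h1
        have hc : show_operation_order (("smooth", true) :: rest) x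
            = show_operation_order rest ("Smooth(" ++ x ++ ")") := by
          simp [show_operation_order]
        have hl : pvLabels (("smooth", true) :: rest) = "Smooth" :: pvLabels rest := rfl
        rw [hc, ih, hl]
        simp [List.replicate_succ']
        exact (List.replicate_succ ..).symm.trans (List.replicate_succ' ..)
      · by_cases h2 : name = "derive"
        · subst h2
          have hc : show_operation_order (("derive", true) :: rest) x
              = show_operation_order rest ("Derive(" ++ x ++ ")") := by
            simp [show_operation_order]
          have hl : pvLabels (("derive", true) :: rest) = "Derive" :: pvLabels rest := rfl
          rw [hc, ih, hl]
          simp [List.replicate_succ']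
          exact (List.replicate_succ ..).symm.trans (List.replicate_succ' ..)
        · by_cases h3 : name = "fit"
          · subst h3
            have hc : show_operation_order (("fit", true) :: rest) x
                = show_operation_order rest ("Fit(" ++ x ++ ")") := by
              simp [show_operation_order]
            have hl : pvLabels (("fit", true) :: rest) = "Fit" :: pvLabels rest := rfl
            rw [hc, ih, hl]
            simp [List.replicate_succ']
            exact (List.replicate_succ ..).symm.trans (List.replicate_succ' ..)
          · have hc : show_operation_order ((name, true) :: rest) x = show_operation_order rest x := by
              simp [show_operation_order, h1, h2, h3]
            have hm : pvMapping = PySem.Dict.mk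
                [("smooth", "Smooth"), ("derive", "Derive"), ("fit", "Fit")] := by decide
            have hl : pvLabels ((name, true) :: rest) = pvLabels rest := by
              simp [pvLabels, hm, PySem.Dict.contains_mk, Ne.symm h1, Ne.symm h2, Ne.symm h3]
            rw [hc, hl]; exact ih x

-- ===== VERDICT (by name: the statement is the Claim_ definition above) =====
theorem show_operation_order_spec : Claim_equal_show_operation_order := by
  intro operations x _
  unfold Spec_show_operation_order
  exact String.toList_inj.mp (by rw [pv_A_toList, pv_alt_toList])
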